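-- pv_equiv track=rewrite | github.com/JKiakumbo/DSA-Practice | problems/sliding_window/least_consecutive_cards_to_match/solution.py | least_consecutive_cards_to_match
-- ===== SOURCE A (Python) =====
-- from collections import Counter
--
-- def least_consecutive_cards_to_match(cards: list[int]) -> int:
--     window: Counter[int] = Counter()
--     ans = len(cards) + 1
--     left = 0
--     for right in range(len(cards)):
--         window[cards[right]] += 1
--         while window[cards[right]] == 2:
--             ans = min(ans, right - left + 1)
--             window[cards[left]] -= 1
--             left += 1
--     if ans == len(cards) + 1:
--         return -1
--
--     return ans
-- ===== SOURCE B (Python) =====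
-- def least_consecutive_cards_to_match(cards: list[int]) -> int:
--     last = {}
--     ans = len(cards) + 1
--     for right, c in enumerate(cards):
--         if c in last:
--             cand = right - last[c] + 1
--             if cand < ans:
--                 ans = cand
--         last[c] = right
--     return -1 if ans == len(cards) + 1 else ans
-- ===== Notes on version B (the rewrite author's own statement) =====
-- stated objective: simpler
-- what changed: Replaces the Counter-based two-pointer sliding window with its inner while-loop shrink by a single pass that records each value's last-seen index in a dict and takes the min gap to the previous occurrence.
import Mathlib
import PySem

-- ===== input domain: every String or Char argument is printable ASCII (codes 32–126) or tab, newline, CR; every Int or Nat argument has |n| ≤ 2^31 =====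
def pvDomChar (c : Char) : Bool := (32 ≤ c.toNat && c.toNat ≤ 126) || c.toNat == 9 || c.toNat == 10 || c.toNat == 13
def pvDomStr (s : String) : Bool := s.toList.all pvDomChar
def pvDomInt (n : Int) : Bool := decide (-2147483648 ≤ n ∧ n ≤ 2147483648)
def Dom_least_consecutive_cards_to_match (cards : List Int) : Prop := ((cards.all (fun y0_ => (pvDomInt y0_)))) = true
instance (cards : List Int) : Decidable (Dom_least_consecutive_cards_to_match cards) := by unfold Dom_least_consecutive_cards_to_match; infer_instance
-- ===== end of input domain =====

-- B replaces A's Counter + two-pointer window (inner while shrink) by a single pass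
-- recording each value's last-seen index in a dict; objective: simpler.

-- ===== PORT A =====
-- A's inner `while window[cards[right]] == 2:` loop. cards[right] is constant during
-- the loop and is passed in as c. cards[left] is read with List.getD: in Python left
-- is always < len(cards) when the body runs, so the plain lookup is exact. The fuel
-- argument only makes the recursion total; the caller passes cards.length, which is
-- never exhausted (each iteration increments left, and left stays ≤ right).
def aInner (cards : List Int) (c : Int) (window : PySem.Dict Int Int) (ans : Int)
    (left right : Nat) : Nat → PySem.Dict Int Int × Int × Nat
  | 0 => (window, ans, left)
  | fuel + 1 =>
    if window.getD c 0 == 2 then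
      aInner cards c (window.modify (cards.getD left 0) 0 (· - 1))
        (min ans ((right : Int) - (left : Int) + 1)) (left + 1) right fuel
    else (window, ans, left)

-- one iteration of A's `for right in range(len(cards)):`
def aStep (cards : List Int) (st : PySem.Dict Int Int × Int × Nat) (right : Nat) :
    PySem.Dict Int Int × Int × Nat :=
  let c := cards.getD right 0                 -- cards[right]; right < len(cards): exact
  let window := st.1.modify c 0 (· + 1)       -- window[cards[right]] += 1  (Counter)
  aInner cards c window st.2.1 st.2.2 right cards.length

def least_consecutive_cards_to_match (cards : List Int) : Int :=
  let st := (List.range cards.length).foldl (aStep cards)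
    (PySem.Dict.empty, (cards.length : Int) + 1, 0)
  if st.2.1 == (cards.length : Int) + 1 then -1 else st.2.1

-- ===== PORT B =====
-- `for right, c in enumerate(cards):` of Source B, carrying (last, ans)
def bLoop : List Int → Nat → PySem.Dict Int Int → Int → Int
  | [], _, _, ans => ans
  | c :: rest, right, last, ans =>
    let ans' := match last.get? c with        -- `if c in last:` + `last[c]`
      | some p =>
        let cand := (right : Int) - p + 1
        if cand < ans then cand else ans
      | none => ans
    bLoop rest (right + 1) (last.insert c (right : Int)) ans'   -- last[c] = right

def least_consecutive_cards_to_match_alt (cards : List Int) : Int :=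
  let ans := bLoop cards 0 PySem.Dict.empty ((cards.length : Int) + 1)
  if ans == (cards.length : Int) + 1 then -1 else ans

-- ===== PRECONDITION & SPEC =====
def Spec_least_consecutive_cards_to_match (cards : List Int) (out : Int) : Prop := out = least_consecutive_cards_to_match_alt cards
instance (cards : List Int) (out : Int) : Decidable (Spec_least_consecutive_cards_to_match cards out) := by unfold Spec_least_consecutive_cards_to_match; infer_instance

-- ===== CLAIM (what is proved, stated in full; the proofs are below) =====
def Claim_equal_least_consecutive_cards_to_match : Prop := ∀ (cards : List Int), Dom_least_consecutive_cards_to_match cards → Spec_least_consecutive_cards_to_match cards (least_consecutive_cards_to_match cards)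

-- ===== LEMMAS AND PROOFS =====

-- the coupling invariant between A's state (window, ansA, left) and B's (last, ansB)
-- after both loops have consumed the prefix `pre` of the input
def CouplingInv (pre : List Int) (window : PySem.Dict Int Int) (ansA : Int) (left : Nat)
    (last : PySem.Dict Int Int) (ansB : Int) : Prop :=
  ansA = ansB ∧
  left ≤ pre.length ∧
  (∀ x : Int, window.getD x 0 = ((pre.drop left).count x : Int)) ∧
  (pre.drop left).Nodup ∧
  (∀ x : Int, last.get? x = none ↔ x ∉ pre) ∧
  (∀ x p, last.get? x = some p →
    ∃ q : Nat, p = (q : Int) ∧ q < pre.length ∧ pre.getD q 0 = x ∧ x ∉ pre.drop (q + 1)) ∧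
  (∀ i : Nat, i < left → ansA ≤ (pre.length : Int) - (i : Int))

lemma getD_mid (pre rest : List Int) (c : Int) :
    (pre ++ c :: rest).getD pre.length 0 = c := by
  simp [List.getD_eq_getElem?_getD]

lemma mem_drop_of_getD (pre : List Int) (x : Int) (q n : Nat)
    (hq : q < pre.length) (hx : pre.getD q 0 = x) (hn : n ≤ q) : x ∈ pre.drop n := by
  have e : pre[q]'hq = x := by rw [← hx]; exact (List.getD_eq_getElem pre 0 hq).symm
  have hq2 : q - n < (pre.drop n).length := by simp [List.length_drop]; omega
  have e2 : (pre.drop n)[q - n]'hq2 = pre[q]'hq := by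
    rw [List.getElem_drop]
    congr 1
    omega
  have : (pre.drop n)[q - n]'hq2 = x := by rw [e2, e]
  exact this ▸ List.getElem_mem hq2

lemma last_unique (pre : List Int) (x : Int) (q1 q2 : Nat)
    (h1 : q1 < pre.length) (e1 : pre.getD q1 0 = x) (n1 : x ∉ pre.drop (q1 + 1))
    (h2 : q2 < pre.length) (e2 : pre.getD q2 0 = x) (n2 : x ∉ pre.drop (q2 + 1)) :
    q1 = q2 := by
  rcases lt_trichotomy q1 q2 with h | h | h
  · exact absurd (mem_drop_of_getD pre x q2 (q1 + 1) h2 e2 (by omega)) n1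
  · exact h
  · exact absurd (mem_drop_of_getD pre x q1 (q2 + 1) h1 e1 (by omega)) n2

lemma getD_of_drop_cons (l : List Int) (n : Nat) (c : Int) (r : List Int)
    (h : l.drop n = c :: r) : l.getD n 0 = c := by
  have h0 : (l.drop n)[0]? = some c := by rw [h]; rfl
  rw [List.getElem?_drop] at h0
  simp only [Nat.add_zero] at h0
  simp [List.getD_eq_getElem?_getD, h0]

lemma drop_succ_of_drop_cons (l : List Int) (n : Nat) (c : Int) (r : List Int)
    (h : l.drop n = c :: r) : l.drop (n + 1) = r := by
  rw [← List.drop_drop, h, List.drop_one, List.tail_cons]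

lemma aInner_skip (cards : List Int) (c : Int) (window : PySem.Dict Int Int)
    (ans : Int) (left right fuel : Nat) (h : window.getD c 0 ≠ 2) :
    aInner cards c window ans left right fuel = (window, ans, left) := by
  cases fuel with
  | zero => rfl
  | succ f => simp [aInner, h]

lemma aInner_run (cards : List Int) (c : Int) :
    ∀ (s1 : List Int) (s2 tail : List Int) (window : PySem.Dict Int Int)
      (ans : Int) (left right fuel : Nat),
      cards.drop left = (s1 ++ c :: s2) ++ tail →
      c ∉ s1 → c ∉ s2 →
      (∀ x : Int, window.getD x 0 = (((s1 ++ c :: s2) ++ [c]).count x : Int)) →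
      s1.length + 1 ≤ fuel →
      ∃ window', aInner cards c window ans left right fuel =
        (window', min ans ((right : Int) - ((left : Int) + s1.length) + 1),
          left + s1.length + 1) ∧
        (∀ x : Int, window'.getD x 0 = ((s2 ++ [c]).count x : Int)) := by
  intro s1
  induction s1 with
  | nil =>
    intro s2 tail window ans left right fuel hdrop _ hs2 hw hfuel
    obtain ⟨f, rfl⟩ : ∃ f, fuel = f + 1 := ⟨fuel - 1, by omega⟩
    have hc2 : s2.count c = 0 := List.count_eq_zero.2 hs2
    have hcond : window.getD c 0 = 2 := by
      have := hw c
      simp [List.count_append, hc2] at this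
      omega
    have hdrop' : cards.drop left = c :: (s2 ++ tail) := by simpa using hdrop
    have hleft : cards.getD left 0 = c := getD_of_drop_cons _ _ _ _ hdrop'
    refine ⟨window.modify c 0 (· - 1), ?_, ?_⟩
    · show aInner cards c window ans left right (f + 1) = _
      rw [aInner, if_pos (by simp [hcond])]
      rw [hleft]
      have h1 : (window.modify c 0 (· - 1)).getD c 0 = 1 := by
        rw [PySem.Dict.getD_modify]
        simp [hcond]
      rw [aInner_skip _ _ _ _ _ _ _ (by rw [h1]; omega)]
      simp
    · intro x
      rw [PySem.Dict.getD_modify]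
      by_cases hx : x = c
      · subst hx
        rw [if_pos rfl, hcond]
        simp [List.count_append, hc2]
      · rw [if_neg hx, hw x]
        simp [List.count_append, Ne.symm hx]
  | cons h t1 ih =>
    intro s2 tail window ans left right fuel hdrop hs1 hs2 hw hfuel
    obtain ⟨f, rfl⟩ : ∃ f, fuel = f + 1 := ⟨fuel - 1, by omega⟩
    have hhc : h ≠ c := fun e => hs1 (e ▸ List.mem_cons_self)
    have ht1 : c ∉ t1 := fun e => hs1 (List.mem_cons_of_mem _ e)
    have hct1 : t1.count c = 0 := List.count_eq_zero.2 ht1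
    have hcs2 : s2.count c = 0 := List.count_eq_zero.2 hs2
    have hcond : window.getD c 0 = 2 := by
      have := hw c
      simp [List.count_append, List.count_cons, hct1, hcs2] at this
      omega
    have hdrop' : cards.drop left = h :: ((t1 ++ c :: s2) ++ tail) := by simpa using hdrop
    have hleft : cards.getD left 0 = h := getD_of_drop_cons _ _ _ _ hdrop'
    have hdropS : cards.drop (left + 1) = (t1 ++ c :: s2) ++ tail :=
      drop_succ_of_drop_cons _ _ _ _ hdrop'
    have hw' : ∀ x : Int, (window.modify h 0 (· - 1)).getD x 0
        = (((t1 ++ c :: s2) ++ [c]).count x : Int) := by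
      intro x
      rw [PySem.Dict.getD_modify]
      by_cases hx : x = h
      · subst hx
        rw [if_pos rfl, hw x]
        simp [List.count_append, Ne.symm hhc]
      · rw [if_neg hx, hw x]
        simp [List.count_append, List.count_cons, Ne.symm hx]
    obtain ⟨w', hrun, hw'D⟩ := ih s2 tail (window.modify h 0 (· - 1))
      (min ans ((right : Int) - (left : Int) + 1)) (left + 1) right f
      hdropS ht1 hs2 hw' (by simpa using Nat.succ_le_succ_iff.1 hfuel)
    refine ⟨w', ?_, hw'D⟩
    show aInner cards c window ans left right (f + 1) = _
    rw [aInner, if_pos (by simp [hcond])]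
    rw [hleft, hrun]
    refine Prod.ext ?_ (Prod.ext ?_ ?_) <;> simp
    · omega
    · omega

lemma inv_none_insert (pre : List Int) (c : Int) (last : PySem.Dict Int Int)
    (h : ∀ x : Int, last.get? x = none ↔ x ∉ pre) :
    ∀ x : Int, (last.insert c ((pre.length : Int))).get? x = none ↔ x ∉ pre ++ [c] := by
  intro x
  by_cases hx : x = c
  · subst hx
    simp [PySem.Dict.get?_insert_self]
  · rw [PySem.Dict.get?_insert_of_ne _ _ hx, h x]
    simp [hx]

lemma inv_some_insert (pre : List Int) (c : Int) (last : PySem.Dict Int Int)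
    (h : ∀ x p, last.get? x = some p →
      ∃ q : Nat, p = (q : Int) ∧ q < pre.length ∧ pre.getD q 0 = x ∧ x ∉ pre.drop (q + 1)) :
    ∀ x p, (last.insert c ((pre.length : Int))).get? x = some p →
      ∃ q : Nat, p = (q : Int) ∧ q < (pre ++ [c]).length ∧ (pre ++ [c]).getD q 0 = x ∧
        x ∉ (pre ++ [c]).drop (q + 1) := by
  intro x p hp
  by_cases hx : x = c
  · subst hx
    rw [PySem.Dict.get?_insert_self] at hp
    refine ⟨pre.length, (Option.some_inj.1 hp).symm, by simp, getD_mid pre [] x, ?_⟩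
    have : (pre ++ [x]).drop (pre.length + 1) = [] :=
      List.drop_eq_nil_of_le (by simp)
    simp [this]
  · rw [PySem.Dict.get?_insert_of_ne _ _ hx] at hp
    obtain ⟨q, rfl, hq, hgd, hnd⟩ := h x p hp
    refine ⟨q, rfl, by simp; omega, ?_, ?_⟩
    · rw [List.getD_append _ _ _ _ hq, hgd]
    · rw [List.drop_append_of_le_length (by omega)]
      simp [hx, hnd]

lemma loop_eq (cards : List Int) :
    ∀ (suf pre : List Int) (window : PySem.Dict Int Int) (ansA : Int) (left : Nat)
      (last : PySem.Dict Int Int) (ansB : Int),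
      cards = pre ++ suf → CouplingInv pre window ansA left last ansB →
      ((List.range' pre.length suf.length).foldl (aStep cards) (window, ansA, left)).2.1
        = bLoop suf pre.length last ansB := by
  intro suf
  induction suf with
  | nil =>
    intro pre w ansA left last ansB _ hinv
    simpa [bLoop] using hinv.1
  | cons c rest ih =>
    intro pre w ansA left last ansB hc hinv
    obtain ⟨hab, hleft, hwin, hnd, hnone, hsome, hans⟩ := hinv
    have hlen : pre.length ≤ cards.length := by subst hc; simp
    have hc0 : cards.getD pre.length 0 = c := by rw [hc]; exact getD_mid pre rest c
    have hdropP : cards.drop left = pre.drop left ++ (c :: rest) := by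
      rw [hc, List.drop_append_of_le_length hleft]
    rw [List.length_cons, List.range'_succ, List.foldl_cons]
    have hstep : aStep cards (w, ansA, left) pre.length
        = aInner cards c (w.modify c 0 (· + 1)) ansA left pre.length cards.length := by
      simp only [aStep]
      rw [hc0]
    rw [hstep]
    have hw2D : ∀ x : Int,
        (w.modify c 0 (· + 1)).getD x 0 = ((pre.drop left ++ [c]).count x : Int) := by
      intro x
      rw [PySem.Dict.getD_modify]
      by_cases hx : x = c
      · subst hx
        rw [if_pos rfl, hwin x]
        simp [List.count_append]
      · rw [if_neg hx, hwin x]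
        simp [List.count_append, Ne.symm hx]
    by_cases hmem : c ∈ pre.drop left
    · -- duplicate inside the window: A's while loop fires
      obtain ⟨s1, s2, hseg⟩ := List.append_of_mem hmem
      have hnd' := hseg ▸ hnd
      have hdec : c ∉ s1 ∧ c ∉ s2 ∧ s2.Nodup := by
        simp [List.nodup_append] at hnd'
        obtain ⟨h1, ⟨h2, h3⟩, h4⟩ := hnd'
        exact ⟨fun hc' => (h4 c hc').1 rfl, h2, h3⟩
      obtain ⟨hcs1, hcs2, hnds2⟩ := hdec
      have hseglen : left + s1.length < pre.length := by
        have := congrArg List.length hseg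
        simp [List.length_drop] at this
        omega
      have hdropPos : pre.drop (left + s1.length) = c :: s2 := by
        rw [← List.drop_drop, hseg, List.drop_left]
      have hgdPos : pre.getD (left + s1.length) 0 = c :=
        getD_of_drop_cons _ _ _ _ hdropPos
      have hdropPos1 : pre.drop (left + s1.length + 1) = s2 :=
        drop_succ_of_drop_cons _ _ _ _ hdropPos
      obtain ⟨w', hrun, hw'D⟩ := aInner_run cards c s1 s2 (c :: rest)
        (w.modify c 0 (· + 1)) ansA left pre.length cards.length
        (by rw [hdropP, hseg]) hcs1 hcs2
        (by intro x; rw [hw2D x, hseg]) (by omega)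
      rw [hrun]
      -- B's side: last[c] is exactly the position A's window shrink stops at
      cases hlc : last.get? c with
      | none =>
        exact absurd ((hnone c).1 hlc) (not_not_intro (List.drop_subset _ _ hmem))
      | some p =>
        obtain ⟨q, rfl, hq, hgd, hndq⟩ := hsome c p hlc
        have hqe : q = left + s1.length :=
          last_unique pre c q (left + s1.length) hq hgd hndq hseglen hgdPos
            (hdropPos1 ▸ hcs2)
        subst hqe
        have hmin : (if (pre.length : Int) - ((left + s1.length : Nat) : Int) + 1 < ansB
            then (pre.length : Int) - ((left + s1.length : Nat) : Int) + 1 else ansB)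
            = min ansA ((pre.length : Int) - ((left : Int) + (s1.length : Int)) + 1) := by
          rw [hab]
          push_cast
          split_ifs <;> omega
        have hinv' : CouplingInv (pre ++ [c]) w'
            (min ansA ((pre.length : Int) - ((left : Int) + (s1.length : Int)) + 1))
            (left + s1.length + 1) (last.insert c (pre.length : Int))
            (min ansA ((pre.length : Int) - ((left : Int) + (s1.length : Int)) + 1)) := by
          refine ⟨rfl, by simp; omega, ?_, ?_, inv_none_insert pre c last hnone,
            inv_some_insert pre c last hsome, ?_⟩
          · intro x
            rw [List.drop_append_of_le_length (by omega), hdropPos1]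
            exact hw'D x
          · rw [List.drop_append_of_le_length (by omega), hdropPos1]
            simp only [List.nodup_append, List.nodup_cons, List.not_mem_nil,
              not_false_iff, List.nodup_nil, and_true, true_and]
            refine ⟨hnds2, fun a ha => by simp; exact fun e => hcs2 (e ▸ ha)⟩
          · intro i hi
            simp only [List.length_append, List.length_cons, List.length_nil]
            by_cases hil : i < left
            · have h2 := hans i hil
              have h1 : min ansA ((pre.length : Int) - ((left : Int) + (s1.length : Int)) + 1)
                  ≤ ansA := min_le_left _ _
              push_cast
              omega
            · have h1 : min ansA ((pre.length : Int) - ((left : Int) + (s1.length : Int)) + 1)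
                  ≤ (pre.length : Int) - ((left : Int) + (s1.length : Int)) + 1 := min_le_right _ _
              push_cast
              omega
        have hih := ih (pre ++ [c]) w'
          (min ansA ((pre.length : Int) - ((left : Int) + (s1.length : Int)) + 1))
          (left + s1.length + 1) (last.insert c (pre.length : Int))
          (min ansA ((pre.length : Int) - ((left : Int) + (s1.length : Int)) + 1))
          (by rw [hc]; simp) hinv'
        rw [show (pre ++ [c]).length = pre.length + 1 from by simp] at hih
        rw [hih, bLoop, hlc]
        simp only [hmin]
    · -- first occurrence inside the window: A's while loop does not fire
      have hcnt : (pre.drop left).count c = 0 := List.count_eq_zero.2 hmem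
      rw [aInner_skip _ _ _ _ _ _ _ (by rw [hw2D c]; simp [List.count_append, hcnt])]
      show _ = bLoop (c :: rest) pre.length last ansB
      rw [bLoop]
      have hansB : (match last.get? c with
          | some p => if (pre.length : Int) - p + 1 < ansB then (pre.length : Int) - p + 1 else ansB
          | none => ansB) = ansB := by
        cases hlc : last.get? c with
        | none => rfl
        | some p =>
          obtain ⟨q, rfl, hq, hgd, _⟩ := hsome c p hlc
          have hql : q < left := by
            by_contra hge
            exact hmem (mem_drop_of_getD pre c q left hq hgd (by omega))
          have := hans q hql
          simp only []
          rw [if_neg (by omega)]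
      rw [hansB]
      have := ih (pre ++ [c]) (w.modify c 0 (· + 1)) ansA left
        (last.insert c (pre.length : Int)) ansB (by rw [hc]; simp) ?_
      · rw [show (pre ++ [c]).length = pre.length + 1 from by simp] at this
        exact this
      · refine ⟨hab, by simp; omega, ?_, ?_, inv_none_insert pre c last hnone,
          inv_some_insert pre c last hsome, ?_⟩
        · intro x
          rw [List.drop_append_of_le_length hleft]
          exact hw2D x
        · rw [List.drop_append_of_le_length hleft]
          simp only [List.nodup_append, List.nodup_cons, List.not_mem_nil,
            not_false_iff, List.nodup_nil, and_true, true_and]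
          refine ⟨hnd, fun a ha => by simp; exact fun e => hmem (e ▸ ha)⟩
        · intro i hi
          have := hans i hi
          simp only [List.length_append, List.length_cons, List.length_nil]
          push_cast
          omega

-- ===== VERDICT (by name: the statement is the Claim_ definition above) =====
theorem least_consecutive_cards_to_match_spec : Claim_equal_least_consecutive_cards_to_match := by
  intro cards _
  unfold Spec_least_consecutive_cards_to_match least_consecutive_cards_to_match least_consecutive_cards_to_match_alt
  have h := loop_eq cards cards [] PySem.Dict.empty ((cards.length : Int) + 1) 0
    PySem.Dict.empty ((cards.length : Int) + 1) (by simp)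
    (by
      refine ⟨rfl, by simp, ?_, by simp, ?_, ?_, ?_⟩
      · intro x; simp [PySem.Dict.getD_empty]
      · intro x; simp [PySem.Dict.get?_empty]
      · intro x p h; simp [PySem.Dict.get?_empty] at h
      · intro i hi; omega)
  simp only [List.length_nil] at h
  simp only [List.range_eq_range']
  rw [h]
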